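-- pv_equiv track=rewrite | github.com/navanni/SP24_Portfolio | vigenere_cipher.py | find_vigenere_key
-- ===== SOURCE A (Python) =====
-- def find_vigenere_key(encrypted_message, decrypted_message):
--     """
--     Determine the key used for the Vigenère cipher given the encrypted and decrypted messages.
--
--     Parameters
--     ----------
--     encrypted_message: str
--         The encrypted message.
--     decrypted_message: str
--         The original (decrypted) message.
--
--     Returns
--     -------
--     key: str
--         The determined key.
--     """
--     key = ''
--     key_length = len(decrypted_message)
--     for enc_char, dec_char in zip(encrypted_message, decrypted_message):
--         if enc_char.isalpha() and dec_char.isalpha():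
--             enc_val = ord(enc_char) - ord('A')
--             dec_val = ord(dec_char) - ord('A')
--             key_char = chr((enc_val - dec_val + 26) % 26 + ord('A'))
--             key += key_char
--
--     # identifies if there is a repeating pattern in the key
--     # assume that key loops if the message is longer than the key
--     for i in range(1, len(key)):
--         if key[:i] == key[i:i+i]:
--             key = key[:i]
--             break
--
--     return key
-- ===== SOURCE B (Python) =====
-- def find_vigenere_key(encrypted_message, decrypted_message):
--     # Derive key characters by a filter/map pipeline, then detect the
--     # repeating prefix in O(n) with the Z-function: the cut point is the
--     # smallest i with Z[i] >= i (the prefix of length i reappears at i).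
--     key = [chr((ord(e) - ord(d)) % 26 + ord('A'))
--            for e, d in zip(encrypted_message, decrypted_message)
--            if e.isalpha() and d.isalpha()]
--     n = len(key)
--     z = [0] * n
--     l = r = 0
--     for i in range(1, n):
--         g = min(r - i, z[i - l]) if i < r else 0
--         while i + g < n and key[g] == key[i + g]:
--             g += 1
--         z[i] = g
--         if i + g > r:
--             l, r = i, i + g
--     for i in range(1, n):
--         if z[i] >= i:
--             return ''.join(key[:i])
--     return ''.join(key)
-- ===== Notes on version B (the rewrite author's own statement) =====
-- stated objective: alternative
-- what changed: B derives the key chars with a filter/map pipeline and replaces A's per-candidate slice comparison with the classic Z-function (l/r-window algorithm): the cut is the smallest i with Z[i] >= i, linear worst case where A's detection is quadratic worst case (though A early-exits on easy inputs).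
import Mathlib
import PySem

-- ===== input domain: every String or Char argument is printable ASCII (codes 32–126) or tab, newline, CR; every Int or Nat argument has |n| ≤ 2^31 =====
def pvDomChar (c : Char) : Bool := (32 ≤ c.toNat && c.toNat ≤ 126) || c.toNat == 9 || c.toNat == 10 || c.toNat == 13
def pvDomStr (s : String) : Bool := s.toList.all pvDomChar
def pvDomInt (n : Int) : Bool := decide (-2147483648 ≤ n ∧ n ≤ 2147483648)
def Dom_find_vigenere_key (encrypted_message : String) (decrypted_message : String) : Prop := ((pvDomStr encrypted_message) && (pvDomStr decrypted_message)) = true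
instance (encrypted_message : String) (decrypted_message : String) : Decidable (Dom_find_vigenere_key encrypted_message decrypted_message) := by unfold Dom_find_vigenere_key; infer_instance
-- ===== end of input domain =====

-- B builds the key chars by a filter/map pipeline and finds the repeating
-- prefix via the Z-function (l/r-window algorithm): smallest i with Z[i] ≥ i —
-- a different period-detection algorithm of linear worst case (objective: alternative).

-- ===== PORT A =====
-- key_char = chr((enc_val - dec_val + 26) % 26 + ord('A'))
def pvA_keyChar (e d : Char) : Char :=
  Char.ofNat ((PySem.Int.mod (((e.toNat : Int) - 65) - ((d.toNat : Int) - 65) + 26) 26).toNat + 65)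

-- for i in range(1, len(key)): if key[:i] == key[i:i+i]: key = key[:i]; break
def pvA_loop (key : List Char) (i : Nat) (fuel : Nat) : List Char :=
  match fuel with
  | 0 => key
  | Nat.succ fuel =>
      if PySem.List.slice key none (some (i : Int)) =
         PySem.List.slice key (some (i : Int)) (some ((i : Int) + (i : Int))) then
        PySem.List.slice key none (some (i : Int))
      else pvA_loop key (i + 1) fuel

def find_vigenere_key (encrypted_message : String) (decrypted_message : String) : String :=
  -- (A also binds key_length = len(decrypted_message), which it never uses)
  let key : List Char :=
    (List.zip encrypted_message.toList decrypted_message.toList).foldl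
      (fun acc p =>
        if PySem.Chars.isalpha p.1 && PySem.Chars.isalpha p.2 then
          acc ++ [pvA_keyChar p.1 p.2]
        else acc) []
  String.ofList (pvA_loop key 1 (key.length - 1))

-- ===== PORT B =====
def pvB_keyChar (e d : Char) : Char :=
  Char.ofNat ((PySem.Int.mod ((e.toNat : Int) - (d.toNat : Int)) 26).toNat + 65)

-- while i + g < n and key[g] == key[i + g]: g += 1
def pvB_extend (s : List Char) (i : Nat) (g : Nat) (fuel : Nat) : Nat :=
  match fuel with
  | 0 => g
  | Nat.succ fuel =>
      if i + g < s.length then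
        if s.getD g 'A' == s.getD (i + g) 'A' then pvB_extend s i (g + 1) fuel else g
      else g

-- for i in range(1, n): g = min(r-i, z[i-l]) if i < r else 0; <while>; z[i]=g; update l,r
def pvB_zloop (s : List Char) (i l r : Nat) (z : List Nat) (fuel : Nat) : List Nat :=
  match fuel with
  | 0 => z
  | Nat.succ fuel =>
      let g0 : Nat := if i < r then min (r - i) (z.getD (i - l) 0) else 0
      let g : Nat := pvB_extend s i g0 s.length
      if r < i + g then pvB_zloop s (i + 1) i (i + g) (z ++ [g]) fuel
      else pvB_zloop s (i + 1) l r (z ++ [g]) fuel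

-- for i in range(1, n): if z[i] >= i: return key[:i]
def pvB_scan (key : List Char) (z : List Nat) (i : Nat) (fuel : Nat) : List Char :=
  match fuel with
  | 0 => key
  | Nat.succ fuel =>
      if i ≤ z.getD i 0 then key.take i else pvB_scan key z (i + 1) fuel

def find_vigenere_key_alt (encrypted_message : String) (decrypted_message : String) : String :=
  let key : List Char :=
    ((List.zip encrypted_message.toList decrypted_message.toList).filter
      (fun p => PySem.Chars.isalpha p.1 && PySem.Chars.isalpha p.2)).map
      (fun p => pvB_keyChar p.1 p.2)
  let n := key.length
  let z : List Nat := if n = 0 then [] else pvB_zloop key 1 0 0 [0] (n - 1)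
  String.ofList (pvB_scan key z 1 (n - 1))

-- ===== PRECONDITION & SPEC =====
def Spec_find_vigenere_key (encrypted_message : String) (decrypted_message : String) (out : String) : Prop := out = find_vigenere_key_alt encrypted_message decrypted_message
instance (encrypted_message : String) (decrypted_message : String) (out : String) : Decidable (Spec_find_vigenere_key encrypted_message decrypted_message out) := by unfold Spec_find_vigenere_key; infer_instance

-- ===== CLAIM (what is proved, stated in full; the proofs are below) =====
def Claim_equal_find_vigenere_key : Prop := ∀ (encrypted_message : String) (decrypted_message : String), Dom_find_vigenere_key encrypted_message decrypted_message → Spec_find_vigenere_key encrypted_message decrypted_message (find_vigenere_key encrypted_message decrypted_message)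

-- ===== LEMMAS AND PROOFS =====

-- naive longest-common-prefix length: the value the Z-function computes
def pvLcp : List Char → List Char → Nat
  | x :: xs, y :: ys => if x = y then pvLcp xs ys + 1 else 0
  | _, _ => 0

-- the true Z-value of s at position j (z[0] stays 0 in the algorithm)
def pvZval (s : List Char) (j : Nat) : Nat :=
  if j = 0 then 0 else pvLcp s (s.drop j)

theorem pvLcp_nil_right (xs : List Char) : pvLcp xs [] = 0 := by
  cases xs <;> rfl

theorem pvLcp_le_right : ∀ (xs ys : List Char), pvLcp xs ys ≤ ys.length := by
  intro xs
  induction xs with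
  | nil => intro ys; simp [pvLcp]
  | cons x xs ih =>
      intro ys
      cases ys with
      | nil => simp [pvLcp]
      | cons y ys =>
          simp only [pvLcp, List.length_cons]
          split
          · have := ih ys; omega
          · omega

theorem pvLcp_take : ∀ (xs ys : List Char),
    xs.take (pvLcp xs ys) = ys.take (pvLcp xs ys) := by
  intro xs
  induction xs with
  | nil => intro ys; simp [pvLcp]
  | cons x xs ih =>
      intro ys
      cases ys with
      | nil => simp [pvLcp]
      | cons y ys =>
          simp only [pvLcp]
          split
          · next h => simp [List.take_succ_cons, h, ih ys]
          · simp

theorem pvLcp_ge_of_take : ∀ (k : Nat) (xs ys : List Char),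
    xs.take k = ys.take k → k ≤ xs.length → k ≤ pvLcp xs ys := by
  intro k
  induction k with
  | zero => intro xs ys _ _; omega
  | succ k ih =>
      intro xs ys ht hk
      match xs, ys with
      | [], _ => simp at hk
      | x :: xs, [] => simp at ht
      | x :: xs, y :: ys =>
          simp only [List.take_succ_cons, List.cons.injEq] at ht
          obtain ⟨rfl, ht⟩ := ht
          rw [show pvLcp (x :: xs) (x :: ys) = pvLcp xs ys + 1 from by simp [pvLcp]]
          have := ih xs ys ht (by simpa using hk)
          omega

theorem pvLcp_decomp : ∀ (g : Nat) (xs ys : List Char),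
    xs.take g = ys.take g → g ≤ xs.length →
    pvLcp xs ys = g + pvLcp (xs.drop g) (ys.drop g) := by
  intro g
  induction g with
  | zero => intro xs ys _ _; simp
  | succ g ih =>
      intro xs ys ht hk
      match xs, ys with
      | [], _ => simp at hk
      | x :: xs, [] => simp at ht
      | x :: xs, y :: ys =>
          simp only [List.take_succ_cons, List.cons.injEq] at ht
          obtain ⟨rfl, ht⟩ := ht
          rw [show pvLcp (x :: xs) (x :: ys) = pvLcp xs ys + 1 from by simp [pvLcp]]
          simp only [List.drop_succ_cons]
          have := ih xs ys ht (by simpa using hk)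
          omega

-- the while-loop extends any starting offset g to the full lcp of the tails
theorem pvB_extend_correct : ∀ (fuel : Nat) (s : List Char) (i g : Nat),
    1 ≤ i → s.length ≤ fuel + g + i →
    pvB_extend s i g fuel = g + pvLcp (s.drop g) (s.drop (i + g)) := by
  intro fuel
  induction fuel with
  | zero =>
      intro s i g hi hf
      have : s.drop (i + g) = [] := List.drop_eq_nil_of_le (by omega)
      simp [pvB_extend, this, pvLcp_nil_right]
  | succ fuel ih =>
      intro s i g hi hf
      unfold pvB_extend
      by_cases hlt : i + g < s.length
      · rw [if_pos hlt]
        have hg : g < s.length := by omega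
        have hd1 : s.drop g = s[g] :: s.drop (g + 1) := List.drop_eq_getElem_cons hg
        have hd2 : s.drop (i + g) = s[i + g] :: s.drop (i + g + 1) :=
          List.drop_eq_getElem_cons hlt
        rw [List.getD_eq_getElem s 'A' hg, List.getD_eq_getElem s 'A' hlt]
        by_cases heq : s[g] = s[i + g]
        · rw [if_pos (by simpa using heq)]
          rw [ih s i (g + 1) hi (by omega), hd1, hd2]
          simp only [pvLcp, if_pos heq]
          have : i + (g + 1) = i + g + 1 := by omega
          rw [this]; omega
        · rw [if_neg (by simpa using heq), hd1, hd2]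
          simp [pvLcp, heq]
      · rw [if_neg hlt]
        have : s.drop (i + g) = [] := List.drop_eq_nil_of_le (by omega)
        simp [this, pvLcp_nil_right]

-- invariant on the (l, r) window
def pvInv (s : List Char) (i l r : Nat) : Prop :=
  (l = 0 ∧ r = 0) ∨ (1 ≤ l ∧ l < i ∧ r = l + pvLcp s (s.drop l))

theorem pv_getElem_idx (s : List Char) {a b : Nat} (h : a = b) (ha : a < s.length) :
    s[a] = s[b]'(h ▸ ha) := by subst h; rfl

-- a take-equality read elementwise
theorem pv_take_eq_elem {s t : List Char} {K : Nat} (h : s.take K = t.take K)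
    {j : Nat} (hj : j < K) (hjs : j < s.length) (hjt : j < t.length) :
    s[j] = t[j] := by
  have h1 : (s.take K)[j]'(by simp; omega) = (t.take K)[j]'(by simp; omega) := by
    simp only [h]
  simpa using h1

-- the initial guess is sound: it matches the prefix and fits in the tail
theorem pv_guess_valid (s : List Char) (i l r : Nat) (z : List Nat)
    (hi : 1 ≤ i) (hin : i < s.length)
    (hz : ∀ j, j < i → z.getD j 0 = pvZval s j)
    (hinv : pvInv s i l r) :
    (if i < r then min (r - i) (z.getD (i - l) 0) else 0) ≤ s.length - i ∧
    s.take (if i < r then min (r - i) (z.getD (i - l) 0) else 0) =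
      (s.drop i).take (if i < r then min (r - i) (z.getD (i - l) 0) else 0) := by
  by_cases hir : i < r
  · rw [if_pos hir]
    rcases hinv with ⟨rfl, rfl⟩ | ⟨hl1, hli, hr⟩
    · omega
    set L := pvLcp s (s.drop l) with hL
    have hLlen : L ≤ s.length - l := by
      have := pvLcp_le_right s (s.drop l); simpa using this
    have hrn : r ≤ s.length := by omega
    have hzval : z.getD (i - l) 0 = pvLcp s (s.drop (i - l)) := by
      rw [hz (i - l) (by omega), pvZval, if_neg (by omega)]
    set K := pvLcp s (s.drop (i - l)) with hK
    have hKlen : K ≤ s.length - (i - l) := by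
      have := pvLcp_le_right s (s.drop (i - l)); simpa using this
    set g0 := min (r - i) (z.getD (i - l) 0) with hg0
    have hg0n : g0 ≤ s.length - i := by omega
    refine ⟨hg0n, ?_⟩
    apply List.ext_getElem
    · simp; omega
    · intro j hj1 hj2
      simp only [List.length_take] at hj1
      have hjg : j < g0 := by omega
      have hjK : j < K := by omega
      -- s[j] = s[(i-l)+j]
      have e1 : s[j]'(by omega) = (s.drop (i - l))[j]'(by simp; omega) :=
        pv_take_eq_elem (pvLcp_take s (s.drop (i - l))) hjK (by omega) (by simp; omega)
      have e1' : s[j]'(by omega) = s[(i - l) + j]'(by omega) := by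
        rw [e1, List.getElem_drop]
      -- s[(i-l)+j] = s[i+j]
      have hm : (i - l) + j < L := by omega
      have e2 : s[(i - l) + j]'(by omega) = (s.drop l)[(i - l) + j]'(by simp; omega) :=
        pv_take_eq_elem (pvLcp_take s (s.drop l)) hm (by omega) (by simp; omega)
      have e2' : s[(i - l) + j]'(by omega) = s[i + j]'(by omega) := by
        rw [e2, List.getElem_drop]
        exact pv_getElem_idx s (by omega) (by omega)
      -- conclude
      simp only [List.getElem_take, List.getElem_drop]
      rw [e1', e2']
  · rw [if_neg hir]
    exact ⟨by omega, by simp⟩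

-- (z ++ [g]) read back
theorem pv_getD_append (z : List Nat) (g : Nat) (j : Nat) :
    (z ++ [g]).getD j 0 = if j < z.length then z.getD j 0 else if j = z.length then g else 0 := by
  simp only [List.getD, List.getElem?_append]
  split
  · rfl
  · next h =>
      split
      · next h2 => subst h2; simp
      · have : 1 ≤ j - z.length := by omega
        rcases Nat.exists_eq_add_of_le this with ⟨k, hk⟩
        simp [hk]

theorem pvB_zloop_correct (s : List Char) : ∀ (fuel i l r : Nat) (z : List Nat),
    1 ≤ i → i ≤ s.length → fuel = s.length - i → z.length = i →
    (∀ j, j < i → z.getD j 0 = pvZval s j) → pvInv s i l r →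
    (pvB_zloop s i l r z fuel).length = s.length ∧
    (∀ j, j < s.length → (pvB_zloop s i l r z fuel).getD j 0 = pvZval s j) := by
  intro fuel
  induction fuel with
  | zero =>
      intro i l r z hi hin hf hzl hz _
      have : i = s.length := by omega
      subst this
      exact ⟨by simpa [pvB_zloop] using hzl, by simpa [pvB_zloop] using hz⟩
  | succ fuel ih =>
      intro i l r z hi hin hf hzl hz hinv
      have hilt : i < s.length := by omega
      obtain ⟨hg0n, hg0take⟩ := pv_guess_valid s i l r z hi hilt hz hinv
      set g0 := (if i < r then min (r - i) (z.getD (i - l) 0) else 0) with hg0def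
      have hgval : pvB_extend s i g0 s.length = pvLcp s (s.drop i) := by
        rw [pvB_extend_correct s.length s i g0 hi (by omega)]
        rw [pvLcp_decomp g0 s (s.drop i) hg0take (by omega)]
        rw [show (s.drop i).drop g0 = s.drop (i + g0) from by
          rw [List.drop_drop, Nat.add_comm]]
      have hLn : pvLcp s (s.drop i) ≤ s.length - i := by
        have := pvLcp_le_right s (s.drop i)
        simp only [List.length_drop] at this
        omega
      have hzv : pvZval s i = pvLcp s (s.drop i) := by
        rw [pvZval, if_neg (by omega)]
      have hstep : pvB_zloop s i l r z (Nat.succ fuel) =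
          if r < i + pvLcp s (s.drop i) then
            pvB_zloop s (i + 1) i (i + pvLcp s (s.drop i)) (z ++ [pvLcp s (s.drop i)]) fuel
          else pvB_zloop s (i + 1) l r (z ++ [pvLcp s (s.drop i)]) fuel := by
        rw [show pvB_zloop s i l r z (Nat.succ fuel) =
            (if r < i + pvB_extend s i g0 s.length then
              pvB_zloop s (i + 1) i (i + pvB_extend s i g0 s.length)
                (z ++ [pvB_extend s i g0 s.length]) fuel
            else pvB_zloop s (i + 1) l r (z ++ [pvB_extend s i g0 s.length]) fuel) from rfl,
          hgval]
      have hzl' : (z ++ [pvLcp s (s.drop i)]).length = i + 1 := by simp [hzl]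
      have hz' : ∀ j, j < i + 1 → (z ++ [pvLcp s (s.drop i)]).getD j 0 = pvZval s j := by
        intro j hj
        rw [pv_getD_append]
        by_cases hji : j < i
        · rw [if_pos (by omega), hz j hji]
        · have : j = i := by omega
          subst this
          rw [if_neg (by omega), if_pos (by omega), hzv]
      rw [hstep]
      by_cases hupd : r < i + pvLcp s (s.drop i)
      · rw [if_pos hupd]
        exact ih (i + 1) i (i + pvLcp s (s.drop i)) (z ++ [pvLcp s (s.drop i)])
          (by omega) (by omega) (by omega) hzl' hz'
          (Or.inr ⟨hi, by omega, rfl⟩)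
      · rw [if_neg hupd]
        refine ih (i + 1) l r (z ++ [pvLcp s (s.drop i)])
          (by omega) (by omega) (by omega) hzl' hz' ?_
        rcases hinv with ⟨rfl, rfl⟩ | ⟨h1, h2, h3⟩
        · exact Or.inl ⟨rfl, rfl⟩
        · exact Or.inr ⟨h1, by omega, h3⟩

-- A's slice test at i equals "Z[i] ≥ i"
theorem pv_cond_iff (key : List Char) (i : Nat) (_hi : 1 ≤ i) (hin : i < key.length) :
    (key.take i = (key.drop i).take i ↔ i ≤ pvLcp key (key.drop i)) := by
  constructor
  · intro h
    exact pvLcp_ge_of_take i key (key.drop i) h (by omega)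
  · intro h
    have ht := pvLcp_take key (key.drop i)
    have := congrArg (List.take i) ht
    simpa [List.take_take, Nat.min_eq_left h] using this
theorem pv_scan_eq (key : List Char) (z : List Nat)
    (hz : ∀ j, 1 ≤ j → j < key.length → z.getD j 0 = pvLcp key (key.drop j)) :
    ∀ (fuel i : Nat), 1 ≤ i → i + fuel ≤ key.length →
    pvA_loop key i fuel = pvB_scan key z i fuel := by
  intro fuel
  induction fuel with
  | zero => intro i _ _; rfl
  | succ fuel ih =>
      intro i hi hle
      unfold pvA_loop pvB_scan
      rw [PySem.List.slice_to_natCast, PySem.List.slice_natCast_add]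
      have hin : i < key.length := by omega
      rw [hz i hi hin]
      by_cases h : key.take i = (key.drop i).take i
      · rw [if_pos h, if_pos ((pv_cond_iff key i hi hin).1 h)]
      · rw [if_neg h, if_neg (fun hc => h ((pv_cond_iff key i hi hin).2 hc))]
        exact ih (i + 1) (by omega) (by omega)

theorem pv_keyChar_eq (e d : Char) : pvA_keyChar e d = pvB_keyChar e d := by
  unfold pvA_keyChar pvB_keyChar
  have h1 : PySem.Int.mod (((e.toNat : Int) - 65) - ((d.toNat : Int) - 65) + 26) 26
      = PySem.Int.mod ((e.toNat : Int) - (d.toNat : Int)) 26 := by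
    rw [PySem.Int.mod_eq_emod_of_pos (b := 26) (by omega), PySem.Int.mod_eq_emod_of_pos (b := 26) (by omega)]
    omega
  rw [h1]

theorem pv_key_eq (el dl : List Char) :
    (List.zip el dl).foldl
      (fun acc p =>
        if PySem.Chars.isalpha p.1 && PySem.Chars.isalpha p.2 then
          acc ++ [pvA_keyChar p.1 p.2]
        else acc) []
    = ((List.zip el dl).filter
        (fun p => PySem.Chars.isalpha p.1 && PySem.Chars.isalpha p.2)).map
        (fun p => pvB_keyChar p.1 p.2) := by
  rw [PySem.List.foldl_append_if]
  simp only [List.nil_append]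
  exact List.map_congr_left (fun p _ => pv_keyChar_eq p.1 p.2)

theorem pv_tail_eq (key : List Char) :
    pvA_loop key 1 (key.length - 1) =
      pvB_scan key (if key.length = 0 then [] else pvB_zloop key 1 0 0 [0] (key.length - 1))
        1 (key.length - 1) := by
  rcases Nat.eq_zero_or_pos key.length with h0 | hpos
  · simp [h0, pvA_loop, pvB_scan]
  · rw [if_neg (by omega)]
    obtain ⟨_, hz⟩ := pvB_zloop_correct key (key.length - 1) 1 0 0 [0]
      (by omega) (by omega) rfl rfl
      (by intro j hj; interval_cases j; simp [pvZval])
      (Or.inl ⟨rfl, rfl⟩)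
    exact pv_scan_eq key _
      (fun j hj1 hj2 => by rw [hz j hj2, pvZval, if_neg (by omega)])
      (key.length - 1) 1 (by omega) (by omega)

-- ===== VERDICT (by name: the statement is the Claim_ definition above) =====
theorem find_vigenere_key_spec : Claim_equal_find_vigenere_key := by
  intro enc dec _
  unfold Spec_find_vigenere_key find_vigenere_key find_vigenere_key_alt
  simp only [pv_key_eq, pv_tail_eq]
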